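-- pv_equiv track=rewrite | github.com/Nortlove/Adam_Luxy | scripts/run_specialty_reviews_learning.py | _normalize_beauty_category
-- ===== SOURCE A (Python) =====
-- def _normalize_beauty_category(category: str) -> str:
--     cat_lower = category.lower() if category else ""
--     if any(x in cat_lower for x in ["skin", "face", "moistur", "serum", "cleanser"]):
--         return "skincare"
--     elif any(x in cat_lower for x in ["makeup", "lipstick", "foundation", "mascara", "eyeshadow"]):
--         return "makeup"
--     elif any(x in cat_lower for x in ["hair", "shampoo", "conditioner"]):
--         return "haircare"
--     elif any(x in cat_lower for x in ["fragrance", "perfume", "cologne"]):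
--         return "fragrance"
--     elif any(x in cat_lower for x in ["tool", "brush", "applicator"]):
--         return "tools"
--     return "skincare"
-- ===== SOURCE B (Python) =====
-- # Text-driven multi-pattern scan: instead of testing each keyword against the
-- # string, slide over the string once and look up each window in a keyword->
-- # priority dict; the best (smallest) priority found picks the label.
-- _KW = {
--     "skin": 0, "face": 0, "moistur": 0, "serum": 0, "cleanser": 0,
--     "makeup": 1, "lipstick": 1, "foundation": 1, "mascara": 1, "eyeshadow": 1,
--     "hair": 2, "shampoo": 2, "conditioner": 2,
--     "fragrance": 3, "perfume": 3, "cologne": 3,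
--     "tool": 4, "brush": 4, "applicator": 4,
-- }
-- _LABELS = ["skincare", "makeup", "haircare", "fragrance", "tools"]
-- _LENS = [4, 5, 6, 7, 8, 9, 10, 11]  # the distinct keyword lengths
--
-- def _normalize_beauty_category(category: str) -> str:
--     s = category.lower() if category else ""
--     hits = [_KW[s[i:i+n]] for i in range(len(s)) for n in _LENS if s[i:i+n] in _KW]
--     return _LABELS[min(hits)] if hits else "skincare"
-- ===== Notes on version B (the rewrite author's own statement) =====
-- stated objective: alternative
-- what changed: Replaces keyword-driven matching (testing each of 19 keywords for substring containment in a five-way if/elif cascade) with text-driven matching: one sliding-window pass over the string that looks each window up in a keyword->priority dict and returns the label of the minimum priority found.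
import Mathlib
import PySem

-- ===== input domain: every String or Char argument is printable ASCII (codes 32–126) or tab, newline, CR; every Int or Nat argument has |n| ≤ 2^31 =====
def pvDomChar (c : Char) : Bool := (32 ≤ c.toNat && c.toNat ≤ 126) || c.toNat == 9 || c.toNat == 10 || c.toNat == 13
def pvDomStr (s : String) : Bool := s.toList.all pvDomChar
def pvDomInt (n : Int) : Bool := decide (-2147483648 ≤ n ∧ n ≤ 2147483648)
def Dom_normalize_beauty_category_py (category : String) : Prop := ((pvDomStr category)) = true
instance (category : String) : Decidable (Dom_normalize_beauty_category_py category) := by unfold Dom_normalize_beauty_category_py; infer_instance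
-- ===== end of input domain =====

-- B replaces keyword-driven containment tests (an if/elif cascade over 19 'k in s' checks)
-- by a text-driven sliding-window scan: each window of the string is looked up in a
-- keyword -> priority dict and the label of the minimum priority found is returned.

-- ===== PORT A =====
def normalize_beauty_category_py (category : String) : String :=
  let cat_lower := if category == "" then "" else PySem.Str.lower category
  if (["skin", "face", "moistur", "serum", "cleanser"].any (fun x => PySem.Str.isIn x cat_lower)) then "skincare"
  else if (["makeup", "lipstick", "foundation", "mascara", "eyeshadow"].any (fun x => PySem.Str.isIn x cat_lower)) then "makeup"
  else if (["hair", "shampoo", "conditioner"].any (fun x => PySem.Str.isIn x cat_lower)) then "haircare"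
  else if (["fragrance", "perfume", "cologne"].any (fun x => PySem.Str.isIn x cat_lower)) then "fragrance"
  else if (["tool", "brush", "applicator"].any (fun x => PySem.Str.isIn x cat_lower)) then "tools"
  else "skincare"

-- ===== PORT B =====
-- keyword -> priority dict (strings as char lists, per the String ↔ List Char convention)
def pvKW : PySem.Dict (List Char) Int := PySem.Dict.mk
  [("skin".toList, 0), ("face".toList, 0), ("moistur".toList, 0), ("serum".toList, 0), ("cleanser".toList, 0),
   ("makeup".toList, 1), ("lipstick".toList, 1), ("foundation".toList, 1), ("mascara".toList, 1), ("eyeshadow".toList, 1),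
   ("hair".toList, 2), ("shampoo".toList, 2), ("conditioner".toList, 2),
   ("fragrance".toList, 3), ("perfume".toList, 3), ("cologne".toList, 3),
   ("tool".toList, 4), ("brush".toList, 4), ("applicator".toList, 4)]

def pvLabels : List String := ["skincare", "makeup", "haircare", "fragrance", "tools"]

def pvLens : List Nat := [4, 5, 6, 7, 8, 9, 10, 11]

-- the comprehension: [_KW[s[i:i+n]] for i in range(len(s)) for n in _LENS if s[i:i+n] in _KW]
def pvHits (s : List Char) : List Int :=
  (PySem.List.pyRange 0 s.length 1).flatMap (fun i =>
    pvLens.filterMap (fun (n : Nat) => pvKW.get? (PySem.List.slice s (some i) (some (i + (n : Int))))))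

def normalize_beauty_category_py_alt (category : String) : String :=
  let s := if category == "" then "" else PySem.Str.lower category
  let hits := pvHits s.toList
  match PySem.List.min? hits (fun x => x) with
  | none => "skincare"                                   -- hits is empty
  | some m => PySem.List.pyGetD pvLabels m "skincare"    -- _LABELS[min(hits)]; m is provably 0..4, the default is unreachable

-- ===== PRECONDITION & SPEC =====
def Spec_normalize_beauty_category_py (category : String) (out : String) : Prop := out = normalize_beauty_category_py_alt category
instance (category : String) (out : String) : Decidable (Spec_normalize_beauty_category_py category out) := by unfold Spec_normalize_beauty_category_py; infer_instance

-- ===== CLAIM (what is proved, stated in full; the proofs are below) =====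
def Claim_equal_normalize_beauty_category_py : Prop := ∀ (category : String), Dom_normalize_beauty_category_py category → Spec_normalize_beauty_category_py category (normalize_beauty_category_py category)

-- ===== LEMMAS AND PROOFS =====

-- every dict entry: key nonempty, key length in pvLens, lookup returns its value, value in 0..4
lemma pv_kw_facts : ∀ x ∈ pvKW.items, x.1 ≠ [] ∧ x.1.length ∈ pvLens ∧ pvKW.get? x.1 = some x.2 ∧ 0 ≤ x.2 ∧ x.2 ≤ 4 := by decide

-- a window of s (nonnegative start) is an infix of s
lemma pv_slice_infix (s : List Char) (i : Int) (hi : 0 ≤ i) (n : Nat) :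
    PySem.List.slice s (some i) (some (i + (n : Int))) <:+: s := by
  rw [PySem.List.slice_toNat s hi (by omega)]
  exact ((s.drop i.toNat).take_prefix _).isInfix.trans (s.drop_suffix i.toNat).isInfix

-- an infix occurs as a window with start inside range(len(s))
lemma pv_infix_slice (k s : List Char) (hk : k ≠ []) (h : k <:+: s) :
    ∃ i ∈ PySem.List.pyRange 0 s.length 1,
      PySem.List.slice s (some i) (some (i + (k.length : Int))) = k := by
  obtain ⟨pre, suf, rfl⟩ := h
  refine ⟨(pre.length : Int), ?_, ?_⟩
  · rw [PySem.List.mem_pyRange_one]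
    have : k.length ≠ 0 := by simpa using hk
    simp [List.length_append]
    omega
  · rw [PySem.List.slice_natCast_add]
    rw [List.append_assoc, List.drop_left, List.take_left]

lemma pv_mem_hits (s : List Char) (p : Int) :
    p ∈ pvHits s ↔ ∃ k, (k, p) ∈ pvKW.items ∧ PySem.Chars.isIn k s = true := by
  constructor
  · intro h
    simp only [pvHits] at h
    obtain ⟨i, hi, hf⟩ := List.mem_flatMap.mp h
    obtain ⟨n, hn, hget⟩ := List.mem_filterMap.mp hf
    have hi0 : 0 ≤ i := (PySem.List.mem_pyRange_one.mp hi).1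
    exact ⟨_, PySem.Dict.mem_items_of_get?_eq_some _ hget,
      (PySem.Chars.isIn_iff_infix _ _).mpr (pv_slice_infix s i hi0 n)⟩
  · rintro ⟨k, hmem, hin⟩
    obtain ⟨hne, hlen, hget, -⟩ := pv_kw_facts _ hmem
    obtain ⟨i, hi, hslice⟩ := pv_infix_slice k s hne ((PySem.Chars.isIn_iff_infix _ _).mp hin)
    simp only [pvHits]
    exact List.mem_flatMap.mpr ⟨i, hi,
      List.mem_filterMap.mpr ⟨k.length, hlen, by rw [hslice]; exact hget⟩⟩

-- group characterizations: j ∈ hits ↔ A's j-th 'any' condition (on the char-list side)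
lemma pv_hits0 (s : List Char) : (0 : Int) ∈ pvHits s ↔
    (["skin", "face", "moistur", "serum", "cleanser"].any (fun x => PySem.Chars.isIn x.toList s)) = true := by
  rw [pv_mem_hits]; simp [pvKW]

lemma pv_hits1 (s : List Char) : (1 : Int) ∈ pvHits s ↔
    (["makeup", "lipstick", "foundation", "mascara", "eyeshadow"].any (fun x => PySem.Chars.isIn x.toList s)) = true := by
  rw [pv_mem_hits]; simp [pvKW]

lemma pv_hits2 (s : List Char) : (2 : Int) ∈ pvHits s ↔
    (["hair", "shampoo", "conditioner"].any (fun x => PySem.Chars.isIn x.toList s)) = true := by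
  rw [pv_mem_hits]; simp [pvKW]

lemma pv_hits3 (s : List Char) : (3 : Int) ∈ pvHits s ↔
    (["fragrance", "perfume", "cologne"].any (fun x => PySem.Chars.isIn x.toList s)) = true := by
  rw [pv_mem_hits]; simp [pvKW]

lemma pv_hits4 (s : List Char) : (4 : Int) ∈ pvHits s ↔
    (["tool", "brush", "applicator"].any (fun x => PySem.Chars.isIn x.toList s)) = true := by
  rw [pv_mem_hits]; simp [pvKW]

lemma pv_hits_bound (s : List Char) (p : Int) (h : p ∈ pvHits s) : 0 ≤ p ∧ p ≤ 4 := by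
  obtain ⟨k, hmem, -⟩ := (pv_mem_hits s p).mp h
  obtain ⟨-, -, -, h0, h4⟩ := pv_kw_facts _ hmem
  exact ⟨h0, h4⟩

-- ===== VERDICT (by name: the statement is the Claim_ definition above) =====
theorem normalize_beauty_category_py_spec : Claim_equal_normalize_beauty_category_py := by
  intro category _
  unfold Spec_normalize_beauty_category_py normalize_beauty_category_py normalize_beauty_category_py_alt
  set t := if category == "" then "" else PySem.Str.lower category with ht
  simp only [PySem.Str.isIn_eq]
  rcases hh : pvHits t.toList with _ | ⟨h, tl⟩
  · have c : ∀ j : Int, j ∉ pvHits t.toList := by intro j; rw [hh]; simp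
    have c0 := (Bool.not_eq_true _).mp ((pv_hits0 t.toList).not.mp (c 0))
    have c1 := (Bool.not_eq_true _).mp ((pv_hits1 t.toList).not.mp (c 1))
    have c2 := (Bool.not_eq_true _).mp ((pv_hits2 t.toList).not.mp (c 2))
    have c3 := (Bool.not_eq_true _).mp ((pv_hits3 t.toList).not.mp (c 3))
    have c4 := (Bool.not_eq_true _).mp ((pv_hits4 t.toList).not.mp (c 4))
    simp only [c0, c1, c2, c3, c4]
    simp
    try rfl
  · rw [PySem.List.min?_id_cons]
    have hmem : tl.foldl min h ∈ pvHits t.toList := by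
      rw [hh]
      rcases PySem.List.foldl_min_mem tl h with he | he
      · rw [he]; exact List.mem_cons_self
      · exact List.mem_cons_of_mem _ he
    have hle : ∀ y ∈ pvHits t.toList, tl.foldl min h ≤ y := by
      intro y hy
      rw [hh] at hy
      rcases List.mem_cons.mp hy with hy | hy
      · exact hy ▸ (PySem.List.foldl_min_le tl h).1
      · exact (PySem.List.foldl_min_le tl h).2 y hy
    obtain ⟨hm0, hm4⟩ := pv_hits_bound _ _ hmem
    generalize hgm : tl.foldl min h = m at hmem hle hm0 hm4 ⊢
    have not_lt : ∀ j : Int, j < m → j ∉ pvHits t.toList := by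
      intro j hjm hj
      exact absurd (hle j hj) (by omega)
    interval_cases m
    · simp only [(pv_hits0 t.toList).mp hmem]
      simp
      try rfl
    · simp only [(Bool.not_eq_true _).mp ((pv_hits0 t.toList).not.mp (not_lt 0 (by omega))),
          (pv_hits1 t.toList).mp hmem]
      simp
      try rfl
    · simp only [(Bool.not_eq_true _).mp ((pv_hits0 t.toList).not.mp (not_lt 0 (by omega))),
          (Bool.not_eq_true _).mp ((pv_hits1 t.toList).not.mp (not_lt 1 (by omega))),
          (pv_hits2 t.toList).mp hmem]
      simp
      try rfl
    · simp only [(Bool.not_eq_true _).mp ((pv_hits0 t.toList).not.mp (not_lt 0 (by omega))),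
          (Bool.not_eq_true _).mp ((pv_hits1 t.toList).not.mp (not_lt 1 (by omega))),
          (Bool.not_eq_true _).mp ((pv_hits2 t.toList).not.mp (not_lt 2 (by omega))),
          (pv_hits3 t.toList).mp hmem]
      simp
      try rfl
    · simp only [(Bool.not_eq_true _).mp ((pv_hits0 t.toList).not.mp (not_lt 0 (by omega))),
          (Bool.not_eq_true _).mp ((pv_hits1 t.toList).not.mp (not_lt 1 (by omega))),
          (Bool.not_eq_true _).mp ((pv_hits2 t.toList).not.mp (not_lt 2 (by omega))),
          (Bool.not_eq_true _).mp ((pv_hits3 t.toList).not.mp (not_lt 3 (by omega))),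
          (pv_hits4 t.toList).mp hmem]
      simp
      try rfl
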